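-- pv_equiv track=rewrite | github.com/F4bian-pacheco/Linux | progra/python/mayores.py | highest_rank
-- ===== SOURCE A (Python) =====
-- def highest_rank(arr):
--     # your code here
--     my_dict = {i:arr.count(i) for i in arr}
--     my_reps = sorted(my_dict, key=my_dict.get, reverse=True)
--     my_counts = sorted(my_dict.values(), reverse=True)
--
--     a = []
--     for i,j in zip(my_reps,my_counts):
--         maxi = max(my_counts)
--         if j == maxi:
--             a.append(i)
--     return max(a)
-- ===== SOURCE B (Python) =====
-- def highest_rank(arr):
--     counts = {}
--     for x in arr:
--         counts[x] = counts.get(x, 0) + 1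
--     return max(counts, key=lambda k: (counts[k], k))
-- ===== Notes on version B (the rewrite author's own statement) =====
-- stated objective: faster
-- what changed: B replaces A's per-element arr.count dict comprehension, the two separate reverse sorts, the zip loop with a repeated max(my_counts), and the intermediate list by one counting pass over arr and a single max over the keys with composite key (count, value).
import Mathlib
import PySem

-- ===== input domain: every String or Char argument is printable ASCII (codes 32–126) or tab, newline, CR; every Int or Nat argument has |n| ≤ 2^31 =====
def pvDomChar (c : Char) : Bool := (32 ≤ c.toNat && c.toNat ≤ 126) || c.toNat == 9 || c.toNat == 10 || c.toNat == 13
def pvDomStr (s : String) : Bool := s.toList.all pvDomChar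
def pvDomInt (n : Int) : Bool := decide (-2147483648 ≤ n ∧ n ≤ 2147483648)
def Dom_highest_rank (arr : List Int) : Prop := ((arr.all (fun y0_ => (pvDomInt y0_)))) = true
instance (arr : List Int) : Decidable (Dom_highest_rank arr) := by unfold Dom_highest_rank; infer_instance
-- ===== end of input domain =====

-- B replaces A's two reverse sorts, zip loop and intermediate list by one counting pass
-- and a single composite-key max (faster: linear counting instead of per-element arr.count plus sorts);
-- proved equal on nonempty lists (A raises ValueError on []).

-- ===== PORT A =====
def highest_rank (arr : List Int) : Int :=
  -- my_dict = {i: arr.count(i) for i in arr}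
  let my_dict : PySem.Dict Int Int :=
    arr.foldl (fun d i => d.insert i ((PySem.List.count arr i : Nat) : Int)) PySem.Dict.empty
  -- my_reps = sorted(my_dict, key=my_dict.get, reverse=True)
  -- (my_dict.get k = some (count k) on every iterated key, so keying by getD k 0 is exact here)
  let my_reps := PySem.List.sorted my_dict.keys (fun k => my_dict.getD k 0) true
  -- my_counts = sorted(my_dict.values(), reverse=True)
  let my_counts := PySem.List.sorted my_dict.values (fun v => v) true
  -- for i,j in zip(my_reps, my_counts): maxi = max(my_counts); if j == maxi: a.append(i)
  let a := (my_reps.zip my_counts).foldl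
    (fun acc p =>
      match PySem.List.max? my_counts (fun x => x) with
      | some maxi => if p.2 = maxi then acc ++ [p.1] else acc
      | none => acc)  -- unreachable: the body only runs when my_counts ≠ []
    []
  -- return max(a); a = [] exactly when arr = [], excluded by Pre_ (ValueError)
  (PySem.List.max? a (fun x => x)).getD 0

-- ===== PORT B =====
def highest_rank_alt (arr : List Int) : Int :=
  -- counts[x] = counts.get(x, 0) + 1
  let counts : PySem.Dict Int Int :=
    arr.foldl (fun d x => d.insert x (d.getD x 0 + 1)) PySem.Dict.empty
  -- max(counts, key=lambda k: (counts[k], k)); empty dict (arr = []) raises ValueError, excluded by Pre_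
  (PySem.List.max2? counts.keys (fun k => counts.getD k 0) (fun k => k)).getD 0

-- ===== PRECONDITION & SPEC =====
-- Pre_ excludes only the empty list, on which both Pythons raise ValueError (max of an empty sequence).
def Pre_highest_rank (arr : List Int) : Prop := arr ≠ []
instance (arr : List Int) : Decidable (Pre_highest_rank arr) := by unfold Pre_highest_rank; infer_instance
def pvWitness_highest_rank : List Int := ([1, 2, 2, 3])
def Spec_highest_rank (arr : List Int) (out : Int) : Prop := out = highest_rank_alt arr
instance (arr : List Int) (out : Int) : Decidable (Spec_highest_rank arr out) := by unfold Spec_highest_rank; infer_instance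

-- ===== CLAIM (what is proved, stated in full; the proofs are below) =====
def Claim_equal_highest_rank : Prop := ∀ (arr : List Int), Dom_highest_rank arr → Pre_highest_rank arr → Spec_highest_rank arr (highest_rank arr)

-- ===== LEMMAS AND PROOFS =====

-- A's dict comprehension: lookup in the folded dict
theorem getA_foldl (l : List Int) (d : PySem.Dict Int Int) (c : Int → Int) (k : Int) :
    (l.foldl (fun d i => d.insert i (c i)) d).get? k
      = if k ∈ l then some (c k) else d.get? k := by
  induction l generalizing d with
  | nil => simp
  | cons x t ih =>
      simp only [List.foldl_cons, ih, PySem.Dict.get?_insert, List.mem_cons]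
      by_cases hk : k ∈ t <;> by_cases hx : k = x <;> simp [hk, hx]

-- the loop body of PySem.List.max2?, named so the fold invariant can be stated about it
def lexStep (k1 k2 : Int → Int) (acc : Option Int) (x : Int) : Option Int :=
  match acc with
  | none => some x
  | some mm =>
    if (decide (k1 mm < k1 x) || !decide (k1 x < k1 mm) && decide (k2 mm < k2 x)) = true
    then some x else some mm

theorem max2?_eq_foldl_lexStep (xs : List Int) (k1 k2 : Int → Int) :
    PySem.List.max2? xs k1 k2 = xs.foldl (lexStep k1 k2) none := by
  unfold PySem.List.max2?
  congr 1
  funext acc x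
  cases acc <;> rfl

-- invariant of the running lexicographic maximum inside PySem.List.max2?
theorem max2_fold (k1 k2 : Int → Int) (t : List Int) (m0 : Int) :
    ∃ m, t.foldl (lexStep k1 k2) (some m0) = some m
      ∧ m ∈ m0 :: t
      ∧ ∀ y ∈ m0 :: t, k1 y < k1 m ∨ (k1 y = k1 m ∧ k2 y ≤ k2 m) := by
  induction t generalizing m0 with
  | nil =>
      exact ⟨m0, rfl, by simp, by intro y hy; simp at hy; subst hy; right; exact ⟨rfl, le_refl _⟩⟩
  | cons x t ih =>
      by_cases hc : (decide (k1 m0 < k1 x) || !decide (k1 x < k1 m0) && decide (k2 m0 < k2 x)) = true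
      all_goals simp only [Bool.or_eq_true, Bool.and_eq_true, Bool.not_eq_true',
        decide_eq_true_eq, decide_eq_false_iff_not, not_or, not_and, not_lt] at hc
      · obtain ⟨m, hfold, hmem, hmax⟩ := ih x
        refine ⟨m, ?_, ?_, ?_⟩
        · rw [List.foldl_cons, show lexStep k1 k2 (some m0) x = some x by
            simp only [lexStep]; rw [if_pos]; simpa using hc]
          exact hfold
        · rcases List.mem_cons.mp hmem with rfl | h
          · simp
          · simp [h]
        · intro y hy
          rcases List.mem_cons.mp hy with rfl | hy'
          · have hx := hmax x (by simp)
            omega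
          · exact hmax y hy'
      · obtain ⟨m, hfold, hmem, hmax⟩ := ih m0
        refine ⟨m, ?_, ?_, ?_⟩
        · rw [List.foldl_cons, show lexStep k1 k2 (some m0) x = some m0 by
            simp only [lexStep]; rw [if_neg]; simpa using hc]
          exact hfold
        · rcases List.mem_cons.mp hmem with rfl | h
          · simp
          · simp [h]
        · intro y hy
          rcases List.mem_cons.mp hy with rfl | hy'
          · exact hmax y (by simp)
          rcases List.mem_cons.mp hy' with rfl | hy''
          · have hm0 := hmax m0 (by simp)
            omega
          · exact hmax y (by simp [hy''])


-- ===== VERDICT (by name: the statement is the Claim_ definition above) =====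
theorem highest_rank_spec : Claim_equal_highest_rank := by
  intro arr _ hpre
  unfold Spec_highest_rank highest_rank highest_rank_alt
  simp only []
  set cnt : Int → Int := fun k => ((List.count k arr : Nat) : Int) with hcntdef
  set dA : PySem.Dict Int Int :=
    arr.foldl (fun d i => d.insert i ((PySem.List.count arr i : Nat) : Int)) PySem.Dict.empty with hdA
  set dB : PySem.Dict Int Int :=
    arr.foldl (fun d x => d.insert x (d.getD x 0 + 1)) PySem.Dict.empty with hdB
  -- facts about B's dict
  have hBd : dB = PySem.Dict.counter arr := PySem.Dict.foldl_insert_getD_add_one_eq_counter arr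
  have hBget : (fun k => dB.getD k 0) = cnt := by
    funext k; rw [hBd]; exact PySem.Dict.getD_counter arr k
  have hBkeys : dB.keys = PySem.Set.ofList arr := by rw [hBd]; exact PySem.Dict.keys_counter arr
  -- facts about A's dict
  have hAnodup : dA.keys.Nodup :=
    PySem.Dict.nodup_keys_foldl_insert _ _ _ (by simp)
  have hAkeys : dA.keys = PySem.Set.ofList arr := by
    rw [hdA, PySem.Dict.keys_foldl_insert]; simp [PySem.Set.update_nil_left]
  have hAgetD : ∀ k, dA.getD k 0 = cnt k := by
    intro k
    rw [PySem.Dict.getD_eq_get?_getD, hdA, getA_foldl]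
    by_cases hk : k ∈ arr
    · simp [hk, PySem.List.count, hcntdef]
    · simp [hk, hcntdef, List.count_eq_zero_of_not_mem hk]
  have hAkeyfun : (fun k => dA.getD k 0) = cnt := funext hAgetD
  have hAvals : dA.values = dA.keys.map cnt := by
    show dA.items.map (·.2) = _
    rw [PySem.Dict.items_eq_map_keys dA hAnodup 0, List.map_map]
    exact List.map_congr_left (fun k _ => hAgetD k)
  rw [hAvals, hAkeys, hAkeyfun, hBkeys, hBget]
  set K := PySem.Set.ofList arr with hKdef
  set counts := PySem.List.sorted (K.map cnt) (fun v => v) true with hcounts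
  set reps := PySem.List.sorted K cnt true with hrepsdef
  have hne : arr ≠ [] := hpre
  have hKne : K ≠ [] := by
    obtain ⟨x, t, hxt⟩ := List.exists_cons_of_ne_nil hne
    have hx : x ∈ K := by rw [hKdef]; exact (PySem.Set.mem_ofList arr x).mpr (by rw [hxt]; simp)
    exact List.ne_nil_of_mem hx
  have hcne : counts ≠ [] := by
    rw [hcounts, Ne, PySem.List.sorted_eq_nil_iff, List.map_eq_nil_iff]
    exact hKne
  obtain ⟨M, hM⟩ : ∃ M, PySem.List.max? counts (fun x => x) = some M := by
    cases h : PySem.List.max? counts (fun x => x) with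
    | none => exact absurd ((PySem.List.max?_eq_none_iff _ _).mp h) hcne
    | some M => exact ⟨M, rfl⟩
  have pr : reps.Perm K := PySem.List.sorted_perm K cnt true
  have pc : counts.Perm (K.map cnt) := PySem.List.sorted_perm _ _ true
  have hKle : ∀ k ∈ K, cnt k ≤ M := by
    intro k hk
    have hv : cnt k ∈ counts := pc.mem_iff.mpr (List.mem_map_of_mem hk)
    simpa using PySem.List.max?_isMax hM _ hv
  obtain ⟨k0, hk0K, hk0c⟩ : ∃ k0, k0 ∈ K ∧ cnt k0 = M := by
    obtain ⟨k0, hk0, hck0⟩ := List.mem_map.mp (pc.mem_iff.mp (PySem.List.max?_mem hM))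
    exact ⟨k0, hk0, hck0⟩
  have hcounts_eq : counts = reps.map cnt := by
    refine List.Perm.eq_of_pairwise (le := fun a b => b ≤ a) ?_ ?_ ?_ ?_
    · intro a b _ _ h1 h2; omega
    · simpa using PySem.List.sorted_pairwise_rev (K.map cnt) (fun v => v)
    · exact List.Pairwise.map cnt (fun a b h => h) (PySem.List.sorted_pairwise_rev K cnt)
    · exact pc.trans (pr.map cnt).symm
  have hzip : reps.zip counts = reps.map (fun x => (x, cnt x)) := by
    rw [hcounts_eq]
    have h := @List.zip_map' Int Int Int id cnt reps
    rw [List.map_id] at h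
    simpa using h
  rw [hzip, List.foldl_map]
  simp only [hM]
  rw [PySem.List.foldl_append_ite_eq_filter (p := fun y => cnt y = M), List.nil_append]
  set a := reps.filter (fun y => decide (cnt y = M)) with hadef
  have hk0a : k0 ∈ a := by
    rw [hadef]
    exact List.mem_filter.mpr ⟨pr.mem_iff.mpr hk0K, by simp [hk0c]⟩
  obtain ⟨r, hr⟩ : ∃ r, PySem.List.max? a (fun x => x) = some r := by
    cases h : PySem.List.max? a (fun x => x) with
    | none => exact absurd ((PySem.List.max?_eq_none_iff _ _).mp h) (List.ne_nil_of_mem hk0a)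
    | some r => exact ⟨r, rfl⟩
  have hra := PySem.List.max?_mem hr
  have hrfacts := List.mem_filter.mp hra
  have hrK : r ∈ K := pr.mem_iff.mp hrfacts.1
  have hrc : cnt r = M := by simpa using hrfacts.2
  have hrmax : ∀ y ∈ K, cnt y = M → y ≤ r := by
    intro y hy hcy
    have hya : y ∈ a := List.mem_filter.mpr ⟨pr.mem_iff.mpr hy, by simp [hcy]⟩
    simpa using PySem.List.max?_isMax hr y hya
  -- B's side: run the composite-key max over K = x0 :: t0
  obtain ⟨x0, t0, hKx⟩ := List.exists_cons_of_ne_nil hKne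
  rw [hr, hKx, max2?_eq_foldl_lexStep, List.foldl_cons,
    show lexStep cnt (fun k => k) none x0 = some x0 from rfl]
  obtain ⟨m, hf, hmm, hlex⟩ := max2_fold cnt (fun k => k) t0 x0
  rw [hf]
  have hmK : m ∈ K := by rw [hKx]; exact hmm
  have h1 := hlex r (by rw [hKx] at hrK; exact hrK)
  have h2 := hKle m hmK
  have h3 : cnt m = M := by rcases h1 with h | h <;> omega
  have h4 : m ≤ r := hrmax m hmK h3
  have : r = m := by rcases h1 with h | ⟨h, h'⟩ <;> [omega; exact le_antisymm h' h4]
  simp [this]
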